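-- pv_equiv track=rewrite | github.com/hpchen3234/EOBT | ZUUU/python_code/zuuu_surface_match/flightplan_route.py | find_node_recursive
-- ===== SOURCE A (Python) =====
-- def find_node_recursive(node, route, adj_dict, visited=None, path=None, max_depth=10):
--     """
--     递归查找与 node 相连的节点，直到找到所有在 route 中的节点。
--     :param node: 当前节点
--     :param route: 滑行道主干路径
--     :param adj_dict: 邻接字典，存储每个节点的邻点
--     :param visited: 已访问的节点集合，防止重复访问
--     :param path: 当前路径，记录递归过程中访问的所有节点
--     :param max_depth: 最大递归深度，防止无限递归
--     :return: 所有在 route 中的节点及其路径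
--     """
--     if visited is None:
--         visited = set()
--     if path is None:
--         path = []
--
--     # 将当前节点添加到路径中
--     path.append(node)
--
--     results = []
--
--     # 检查当前节点的邻点
--     neighbors = adj_dict.get(node, [])
--     intersection_nodes = [neighbor for neighbor in neighbors if neighbor in route]
--
--     # 如果当前节点有多个邻点在路径上，停止递归并返回这些交点及其路径
--     if intersection_nodes:
--         for intersection_node in intersection_nodes:
--             # 确保路径包含 stand_end 和交点
--             full_path = path + [intersection_node]
--             results.append((intersection_node, full_path))
--         return results
--
--     if max_depth <= 0:
--         return results
--
--     visited.add(node)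
--
--     for neighbor in neighbors:
--         if neighbor not in visited:
--             # 递归查找邻点
--             neighbor_results = find_node_recursive(neighbor, route, adj_dict, visited, path[:], max_depth - 1)
--             results.extend(neighbor_results)
--
--     return results
-- ===== SOURCE B (Python) =====
-- def find_node_recursive(node, route, adj_dict, visited=None, path=None, max_depth=10):
--     """
--     Iterative DFS with an explicit stack instead of recursion.
--     Same return value and same mutations of the caller's visited/path as the
--     recursive original.
--     """
--     if visited is None:
--         visited = set()
--     if path is None:
--         path = []
--
--     path.append(node)
--
--     results = []
--     # stack entries: (node, path up to and including node, remaining depth, check_visited)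
--     stack = [(node, path[:], max_depth, False)]
--     while stack:
--         cur, cur_path, depth, check = stack.pop()
--         if check and cur in visited:
--             continue
--         neighbors = adj_dict.get(cur, [])
--         inter = [n for n in neighbors if n in route]
--         if inter:
--             for x in inter:
--                 results.append((x, cur_path + [x]))
--             continue
--         if depth <= 0:
--             continue
--         visited.add(cur)
--         for n in reversed(neighbors):
--             stack.append((n, cur_path + [n], depth - 1, True))
--     return results
-- ===== Notes on version B (the rewrite author's own statement) =====
-- stated objective: alternative
-- what changed: Replaces the recursive DFS by an iterative DFS over an explicit stack of (node, path, depth, check) entries with a pop-time visited check, reproducing the original's pre-order results and its mutations of the caller-supplied visited/path.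
import Mathlib
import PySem

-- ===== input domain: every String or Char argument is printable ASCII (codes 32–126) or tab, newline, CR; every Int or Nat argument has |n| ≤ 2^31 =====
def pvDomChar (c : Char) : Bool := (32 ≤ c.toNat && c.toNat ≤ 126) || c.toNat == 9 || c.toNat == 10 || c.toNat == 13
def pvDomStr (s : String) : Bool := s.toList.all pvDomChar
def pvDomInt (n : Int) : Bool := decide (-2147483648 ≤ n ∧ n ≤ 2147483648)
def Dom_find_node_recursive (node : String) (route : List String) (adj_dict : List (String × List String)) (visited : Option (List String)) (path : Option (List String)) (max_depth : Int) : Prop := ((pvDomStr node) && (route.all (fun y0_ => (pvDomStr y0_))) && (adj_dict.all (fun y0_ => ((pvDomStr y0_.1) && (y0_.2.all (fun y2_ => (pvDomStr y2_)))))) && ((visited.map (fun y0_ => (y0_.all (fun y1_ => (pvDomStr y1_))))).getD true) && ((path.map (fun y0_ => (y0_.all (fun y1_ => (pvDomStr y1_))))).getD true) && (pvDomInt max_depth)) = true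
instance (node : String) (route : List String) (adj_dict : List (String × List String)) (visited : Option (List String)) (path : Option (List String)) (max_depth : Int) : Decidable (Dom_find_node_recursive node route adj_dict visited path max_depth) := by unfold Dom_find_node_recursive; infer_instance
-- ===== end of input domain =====

-- B replaces the recursive DFS by an iterative DFS over an explicit stack (pop-time visited
-- check); equivalence proved for the RETURN value — both Pythons also mutate the caller's
-- visited/path arguments in the same way, which the ports model by value.


-- ===== PORT A =====
-- adj_dict.get(node, []): first-match association-list lookup (the dict convention), exact
def fnrGet (adj_dict : List (String × List String)) (k : String) : List String :=
  (List.lookup k adj_dict).getD []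

-- bound on any neighbor-list length: a proof device used only in termination measures
def fnrCap (adj_dict : List (String × List String)) : Nat :=
  (adj_dict.map (fun p => p.2.length)).foldr max 0 + 1

lemma fnrGet_len_lt_cap (adj_dict : List (String × List String)) (k : String) :
    (fnrGet adj_dict k).length < fnrCap adj_dict := by
  induction adj_dict with
  | nil => simp [fnrGet, fnrCap]
  | cons a t ih =>
    by_cases h : k == a.1
    · simp only [fnrGet, fnrCap, List.lookup, h, List.map, List.foldr, Option.getD_some] at *
      omega
    · simp only [fnrGet, fnrCap, List.lookup, h, List.map, List.foldr] at *
      omega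

-- A's recursion: fnrGoA is one call of find_node_recursive (path = caller's path before
-- 'path.append(node)'); fnrGoAList is its 'for neighbor in neighbors' loop.  The shared
-- 'visited' set is mutated across sibling calls, so both return (results, visited).
mutual
def fnrGoA (route : List String) (adj_dict : List (String × List String)) (max_depth : Int)
    (node : String) (visited : List String) (path : List String) :
    List (String × List String) × List String :=
  let path := path ++ [node]
  let neighbors := fnrGet adj_dict node
  let inter := neighbors.filter (fun n => route.contains n)
  if inter ≠ [] then
    (inter.map (fun x => (x, path ++ [x])), visited)
  else if h : max_depth ≤ 0 then
    ([], visited)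
  else
    fnrGoAList route adj_dict (max_depth - 1) neighbors (PySem.Set.add visited node) path
termination_by (fnrCap adj_dict + 2) * max_depth.toNat
decreasing_by
  have hl := fnrGet_len_lt_cap adj_dict node
  have hm : max_depth.toNat = (max_depth - 1).toNat + 1 := by omega
  rw [hm, Nat.mul_succ]
  omega

def fnrGoAList (route : List String) (adj_dict : List (String × List String)) (d : Int)
    (neighbors : List String) (visited : List String) (path : List String) :
    List (String × List String) × List String :=
  match neighbors with
  | [] => ([], visited)
  | n :: rest =>
    if visited.contains n then
      fnrGoAList route adj_dict d rest visited path
    else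
      let r := fnrGoA route adj_dict d n visited path
      let rr := fnrGoAList route adj_dict d rest r.2 path
      (r.1 ++ rr.1, rr.2)
termination_by (fnrCap adj_dict + 2) * d.toNat + neighbors.length + 1
decreasing_by
  all_goals (try simp only [List.length_cons])
  all_goals omega
end

def find_node_recursive (node : String) (route : List String) (adj_dict : List (String × List String)) (visited : Option (List String)) (path : Option (List String)) (max_depth : Int) : List (String × List String) :=
  let visited := match visited with | none => PySem.Set.empty | some s => s
  let path := match path with | none => [] | some p => p
  (fnrGoA route adj_dict max_depth node visited path).1

-- ===== PORT B =====
-- stack entry: (node, path up to and including node, remaining depth, check_visited)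

lemma fnrRevFoldlCons {α : Type} (f : String → α) :
    ∀ (ms : List String) (rest : List α),
      ms.reverse.foldl (fun st m => f m :: st) rest = ms.map f ++ rest := by
  intro ms
  induction ms with
  | nil => intro rest; simp
  | cons m t ih => intro rest; simp [List.foldl_append, ih]

def fnrWeight (C : Nat) (stack : List (String × List String × Int × Bool)) : Nat :=
  (stack.map (fun e => C ^ e.2.2.1.toNat)).sum

lemma fnrWeight_push (C : Nat) (hC : 1 ≤ C) (cur : String) (curPath : List String) (d : Int)
    (chk : Bool) (rest : List (String × List String × Int × Bool)) (ms : List String)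
    (hms : ms.length < C) (hd : ¬ d ≤ 0) :
    fnrWeight C (ms.reverse.foldl
        (fun st m => (m, curPath ++ [m], d - 1, true) :: st) rest) <
      fnrWeight C ((cur, curPath, d, chk) :: rest) := by
  rw [fnrRevFoldlCons (fun m => (m, curPath ++ [m], d - 1, true)) ms rest]
  simp only [fnrWeight, List.map_append, List.sum_append, List.map_map, List.map, List.sum_cons]
  have h1 : (List.map ((fun e : String × List String × Int × Bool => C ^ e.2.2.1.toNat) ∘
      fun m => (m, curPath ++ [m], d - 1, true)) ms).sum = ms.length * C ^ (d - 1).toNat := by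
    show (List.map (fun _ => C ^ (d - 1).toNat) ms).sum = _
    rw [List.map_const']
    simp [List.sum_replicate]
  rw [h1]
  have hdd : d.toNat = (d - 1).toNat + 1 := by omega
  have hlt : ms.length * C ^ (d - 1).toNat < C ^ d.toNat := by
    rw [hdd, pow_succ]
    calc ms.length * C ^ (d - 1).toNat ≤ (C - 1) * C ^ (d - 1).toNat :=
            Nat.mul_le_mul_right _ (by omega)
      _ < C * C ^ (d - 1).toNat := by
            have hp : 0 < C ^ (d - 1).toNat := Nat.pow_pos (by omega)
            exact (Nat.mul_lt_mul_right hp).mpr (by omega)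
      _ = C ^ (d - 1).toNat * C := Nat.mul_comm _ _
  omega

def fnrLoop (route : List String) (adj_dict : List (String × List String))
    (stack : List (String × List String × Int × Bool))
    (results : List (String × List String)) (visited : List String) :
    List (String × List String) × List String :=
  match stack with
  | [] => (results, visited)
  | (cur, curPath, depth, check) :: rest =>
    if check && visited.contains cur then
      fnrLoop route adj_dict rest results visited
    else
      let neighbors := fnrGet adj_dict cur
      let inter := neighbors.filter (fun n => route.contains n)
      if inter ≠ [] then
        fnrLoop route adj_dict rest
          (results ++ inter.map (fun x => (x, curPath ++ [x]))) visited
      else if h : depth ≤ 0 then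
        fnrLoop route adj_dict rest results visited
      else
        fnrLoop route adj_dict
          (neighbors.reverse.foldl (fun st m => (m, curPath ++ [m], depth - 1, true) :: st) rest)
          results (PySem.Set.add visited cur)
termination_by fnrWeight (fnrCap adj_dict) stack
decreasing_by
  · simp only [fnrWeight, List.map, List.sum_cons]
    have : 1 ≤ fnrCap adj_dict ^ depth.toNat :=
      Nat.one_le_pow _ _ (by unfold fnrCap; omega)
    omega
  · simp only [fnrWeight, List.map, List.sum_cons]
    have : 1 ≤ fnrCap adj_dict ^ depth.toNat :=
      Nat.one_le_pow _ _ (by unfold fnrCap; omega)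
    omega
  · simp only [fnrWeight, List.map, List.sum_cons]
    have : 1 ≤ fnrCap adj_dict ^ depth.toNat :=
      Nat.one_le_pow _ _ (by unfold fnrCap; omega)
    omega
  · exact fnrWeight_push (fnrCap adj_dict) (by unfold fnrCap; omega) cur curPath depth check
      rest (fnrGet adj_dict cur) (fnrGet_len_lt_cap adj_dict cur) h

def find_node_recursive_alt (node : String) (route : List String) (adj_dict : List (String × List String)) (visited : Option (List String)) (path : Option (List String)) (max_depth : Int) : List (String × List String) :=
  let visited := match visited with | none => PySem.Set.empty | some s => s
  let path := match path with | none => [] | some p => p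
  let path := path ++ [node]
  (fnrLoop route adj_dict [(node, path, max_depth, false)] [] visited).1

-- ===== PRECONDITION & SPEC =====
def Spec_find_node_recursive (node : String) (route : List String) (adj_dict : List (String × List String)) (visited : Option (List String)) (path : Option (List String)) (max_depth : Int) (out : List (String × List String)) : Prop := out = find_node_recursive_alt node route adj_dict visited path max_depth
instance (node : String) (route : List String) (adj_dict : List (String × List String)) (visited : Option (List String)) (path : Option (List String)) (max_depth : Int) (out : List (String × List String)) : Decidable (Spec_find_node_recursive node route adj_dict visited path max_depth out) := by unfold Spec_find_node_recursive; infer_instance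

-- ===== CLAIM (what is proved, stated in full; the proofs are below) =====
def Claim_equal_find_node_recursive : Prop := ∀ (node : String) (route : List String) (adj_dict : List (String × List String)) (visited : Option (List String)) (path : Option (List String)) (max_depth : Int), Dom_find_node_recursive node route adj_dict visited path max_depth → Spec_find_node_recursive node route adj_dict visited path max_depth (find_node_recursive node route adj_dict visited path max_depth)

-- ===== LEMMAS AND PROOFS =====

-- Core bridge: popping one entry (n, pp++[n], d, chk) runs A's whole recursive call
-- fnrGoA d n v pp (unless the pop-time visited check skips it), then continues with rest.
lemma fnrLoop_entry : ∀ (k : Nat) (route : List String)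
    (adj_dict : List (String × List String)) (d : Int), d.toNat ≤ k →
    ∀ (n : String) (pp : List String) (v : List String)
      (rest : List (String × List String × Int × Bool))
      (res : List (String × List String)) (chk : Bool),
    fnrLoop route adj_dict ((n, pp ++ [n], d, chk) :: rest) res v =
      if chk && v.contains n then fnrLoop route adj_dict rest res v
      else
        fnrLoop route adj_dict rest (res ++ (fnrGoA route adj_dict d n v pp).1)
          (fnrGoA route adj_dict d n v pp).2 := by
  intro k
  induction k using Nat.strong_induction_on with
  | _ k ih =>
  intro route adj_dict d hd n pp v rest res chk
  -- the neighbor loop at depth d-1: consuming the pushed entries runs fnrGoAList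
  have hlist : ∀ (e : Int), e.toNat < k → ∀ (ms : List String) (pp' : List String)
      (v : List String) (rest : List (String × List String × Int × Bool))
      (res : List (String × List String)),
      fnrLoop route adj_dict (ms.map (fun m => (m, pp' ++ [m], e, true)) ++ rest) res v =
        fnrLoop route adj_dict rest (res ++ (fnrGoAList route adj_dict e ms v pp').1)
          (fnrGoAList route adj_dict e ms v pp').2 := by
    intro e he ms
    induction ms with
    | nil => intro pp' v rest res; simp [fnrGoAList]
    | cons m t iht =>
      intro pp' v rest res
      rw [List.map_cons, List.cons_append,
        ih e.toNat he route adj_dict e (le_refl _) m pp' v (t.map (fun m => (m, pp' ++ [m], e, true)) ++ rest) res true]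
      rw [fnrGoAList]
      by_cases hm : v.contains m
      · simp only [hm, Bool.and_true, if_pos]
        rw [iht pp' v rest res]
      · simp only [hm, Bool.true_and, Bool.false_eq_true, if_neg, not_false_iff]
        rw [iht pp' (fnrGoA route adj_dict e m v pp').2 rest
          (res ++ (fnrGoA route adj_dict e m v pp').1)]
        simp [List.append_assoc]
  rw [fnrLoop, fnrGoA]
  by_cases hchk : (chk && v.contains n) = true
  · simp only [hchk, ite_true]
  · simp only [hchk, ite_false, Bool.false_eq_true]
    split_ifs with hint hd0
    · rfl
    · simp
    · rw [fnrRevFoldlCons (fun m => (m, (pp ++ [n]) ++ [m], d - 1, true)) (fnrGet adj_dict n) rest]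
      exact hlist (d - 1) (by omega) (fnrGet adj_dict n) (pp ++ [n]) (PySem.Set.add v n) rest res

theorem fnr_equal : ∀ (node : String) (route : List String)
    (adj_dict : List (String × List String)) (visited : Option (List String))
    (path : Option (List String)) (max_depth : Int),
    find_node_recursive node route adj_dict visited path max_depth =
      find_node_recursive_alt node route adj_dict visited path max_depth := by
  intro node route adj_dict visited path max_depth
  have key : ∀ (v p : List String),
      (fnrGoA route adj_dict max_depth node v p).1 =
        (fnrLoop route adj_dict [(node, p ++ [node], max_depth, false)] [] v).1 := by
    intro v p
    rw [fnrLoop_entry max_depth.toNat route adj_dict max_depth (le_refl _) node p v [] [] false]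
    simp [fnrLoop]
  cases visited <;> cases path <;> exact key _ _

-- ===== VERDICT (by name: the statement is the Claim_ definition above) =====
theorem find_node_recursive_spec : Claim_equal_find_node_recursive := by
  intro node route adj_dict visited path max_depth _
  unfold Spec_find_node_recursive
  exact fnr_equal node route adj_dict visited path max_depth
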